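-- pv_equiv track=rewrite | github.com/reills/bach | tests/test_descriptors.py | _split_bars
-- ===== SOURCE A (Python) =====
-- def _split_bars(tokens):
--     bars = []
--     current = []
--     for tok in tokens:
--         if tok == "BAR":
--             if current:
--                 bars.append(current)
--             current = ["BAR"]
--         else:
--             current.append(tok)
--     if current:
--         bars.append(current)
--     return bars
-- ===== SOURCE B (Python) =====
-- def _split_bars(tokens):
--     def span_no_bar(ts):
--         for k, t in enumerate(ts):
--             if t == "BAR":
--                 return ts[:k], ts[k:]
--         return ts, []
--
--     pre, rest = span_no_bar(tokens)
--     bars = [pre] if pre else []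
--     while rest:
--         seg, rest = span_no_bar(rest[1:])
--         bars.append(["BAR"] + seg)
--     return bars
-- ===== Notes on version B (the rewrite author's own statement) =====
-- stated objective: alternative
-- what changed: Replaces the per-token fold with a running 'current' accumulator by a span-based decomposition: take the non-BAR prefix as the leading bar (if nonempty), then repeatedly cut the next segment at the following BAR marker.
import Mathlib
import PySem

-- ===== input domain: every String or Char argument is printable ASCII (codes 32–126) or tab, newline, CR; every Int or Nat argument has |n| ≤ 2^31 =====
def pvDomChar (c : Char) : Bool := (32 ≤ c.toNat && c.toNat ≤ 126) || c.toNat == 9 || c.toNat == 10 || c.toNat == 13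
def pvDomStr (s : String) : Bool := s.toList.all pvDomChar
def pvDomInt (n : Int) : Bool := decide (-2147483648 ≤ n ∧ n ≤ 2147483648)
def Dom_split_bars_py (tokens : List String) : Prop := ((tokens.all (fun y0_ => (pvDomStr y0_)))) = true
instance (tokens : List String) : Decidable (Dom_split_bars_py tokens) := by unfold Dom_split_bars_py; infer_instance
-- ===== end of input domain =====

-- B replaces A's per-token fold with a span-based decomposition (leading non-BAR prefix, then
-- repeated cuts at each BAR marker); alternative decomposition, same O(n) cost.


-- ===== PORT A =====
-- literal transliteration of A: a fold carrying (bars, current), then a final flush of current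
def split_bars_py (tokens : List String) : List (List String) :=
  let st := tokens.foldl
    (fun (st : List (List String) × List String) tok =>
      let bars := st.1
      let current := st.2
      if tok = "BAR" then
        ((if current = [] then bars else bars ++ [current]), ["BAR"])
      else
        (bars, current ++ [tok]))
    ([], [])
  if st.2 = [] then st.1 else st.1 ++ [st.2]

-- ===== PORT B =====
-- the while loop of Source B: rest is [] or starts at a BAR; cut the next segment at the following BAR
def splitBarsGo (l : List String) : List (List String) :=
  match l with
  | [] => []
  | _ :: ts =>
    ("BAR" :: ts.takeWhile (· != "BAR")) :: splitBarsGo (ts.dropWhile (· != "BAR"))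
  termination_by l.length
  decreasing_by
    exact Nat.lt_succ_of_le (List.length_dropWhile_le _ _)

def split_bars_py_alt (tokens : List String) : List (List String) :=
  let p := tokens.span (· != "BAR")
  (if p.1.isEmpty then [] else [p.1]) ++ splitBarsGo p.2

-- ===== PRECONDITION & SPEC =====
def Spec_split_bars_py (tokens : List String) (out : List (List String)) : Prop := out = split_bars_py_alt tokens
instance (tokens : List String) (out : List (List String)) : Decidable (Spec_split_bars_py tokens out) := by unfold Spec_split_bars_py; infer_instance

-- ===== CLAIM (what is proved, stated in full; the proofs are below) =====
def Claim_equal_split_bars_py : Prop := ∀ (tokens : List String), Dom_split_bars_py tokens → Spec_split_bars_py tokens (split_bars_py tokens)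

-- ===== LEMMAS AND PROOFS =====

@[simp] theorem splitBarsGo_nil : splitBarsGo [] = [] := by rw [splitBarsGo]

@[simp] theorem splitBarsGo_cons (t : String) (ts : List String) :
    splitBarsGo (t :: ts) =
      ("BAR" :: ts.takeWhile (· != "BAR")) :: splitBarsGo (ts.dropWhile (· != "BAR")) := by
  rw [splitBarsGo]

-- recursive characterisation of A's fold-with-flush, with explicit accumulator `current`
def fA (current : List String) : List String → List (List String)
  | [] => if current = [] then [] else [current]
  | t :: ts =>
    if t = "BAR" then (if current = [] then [] else [current]) ++ fA ["BAR"] ts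
    else fA (current ++ [t]) ts

theorem foldA_eq_fA (ts : List String) : ∀ (bars : List (List String)) (current : List String),
    (let st := ts.foldl
        (fun (st : List (List String) × List String) tok =>
          let b := st.1
          let c := st.2
          if tok = "BAR" then ((if c = [] then b else b ++ [c]), ["BAR"])
          else (b, c ++ [tok]))
        (bars, current)
      if st.2 = [] then st.1 else st.1 ++ [st.2])
    = bars ++ fA current ts := by
  induction ts with
  | nil => intro bars current; by_cases h : current = [] <;> simp [fA, h]
  | cons t ts ih =>
    intro bars current
    by_cases h : t = "BAR"
    · by_cases hc : current = [] <;>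
        simp [List.foldl_cons, fA, h, hc, ih, List.append_assoc]
    · simp [List.foldl_cons, fA, h, ih]

-- fA with accumulator = "prepend the accumulator to the non-BAR prefix, then cut at BAR markers"
theorem fA_eq_span (ts : List String) : ∀ (current : List String),
    fA current ts =
      (if current ++ ts.takeWhile (· != "BAR") = [] then []
       else [current ++ ts.takeWhile (· != "BAR")]) ++
      splitBarsGo (ts.dropWhile (· != "BAR")) := by
  induction ts with
  | nil => intro current; by_cases h : current = [] <;> simp [fA, h]
  | cons t ts ih =>
    intro current
    by_cases h : t = "BAR"
    · by_cases hc : current = [] <;>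
        simp [fA, h, hc, ih]
    · simp [fA, h, ih, List.append_assoc]

-- ===== VERDICT (by name: the statement is the Claim_ definition above) =====
theorem split_bars_py_spec : Claim_equal_split_bars_py := by
  intro tokens _
  show split_bars_py tokens = split_bars_py_alt tokens
  have h1 := foldA_eq_fA tokens [] []
  have h2 := fA_eq_span tokens []
  simp only [List.nil_append] at h1 h2
  simp [split_bars_py, split_bars_py_alt, h1, h2, List.span_eq_takeWhile_dropWhile,
    List.isEmpty_iff]
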